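-- pv_equiv track=rewrite | github.com/jrkoenig/folseparators | separators/separate.py | _choose_split_fact_largest
-- ===== SOURCE A (Python) =====
-- from typing import Tuple, TypeVar, Iterable, FrozenSet, Union, Callable, Generator, Set, Optional, cast, Type, Collection, List, Dict, DefaultDict, Iterator, Any, Sequence
--
-- Assumptions = Dict[int, int]
--
-- def _choose_split_fact_largest(base: Assumptions, choices: Sequence[Assumptions]) -> Optional[int]:
--     sets: List[List[int]] = []
--     for a in choices:
--         sets.append([])
--         for k, v in a.items():
--             if k not in base or base[k] == -1:
--                 sets[-1].append(k)
--     sets.sort(key = len)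
--     for s in reversed(sets):
--         if len(s) > 0:
--             return s[0]
--     return None
-- ===== SOURCE B (Python) =====
-- from typing import Tuple, TypeVar, Iterable, FrozenSet, Union, Callable, Generator, Set, Optional, cast, Type, Collection, List, Dict, DefaultDict, Iterator, Any, Sequence
--
-- Assumptions = Dict[int, int]
--
-- def _choose_split_fact_largest(base: Assumptions, choices: Sequence[Assumptions]) -> Optional[int]:
--     best_count = 0
--     best_key: Optional[int] = None
--     for a in choices:
--         count = 0
--         first: Optional[int] = None
--         for k in a:
--             if k not in base or base[k] == -1:
--                 count += 1
--                 if first is None: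
--                     first = k
--         if count >= best_count:
--             best_count = count
--             best_key = first
--     return best_key if best_count > 0 else None
-- ===== Notes on version B (the rewrite author's own statement) =====
-- stated objective: alternative
-- what changed: Single linear pass keeping a running best (count, first new key) with ties won by later choices, instead of materialising the list of new-key lists, stably sorting it by length and scanning the reversal for the first non-empty entry.
import Mathlib
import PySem

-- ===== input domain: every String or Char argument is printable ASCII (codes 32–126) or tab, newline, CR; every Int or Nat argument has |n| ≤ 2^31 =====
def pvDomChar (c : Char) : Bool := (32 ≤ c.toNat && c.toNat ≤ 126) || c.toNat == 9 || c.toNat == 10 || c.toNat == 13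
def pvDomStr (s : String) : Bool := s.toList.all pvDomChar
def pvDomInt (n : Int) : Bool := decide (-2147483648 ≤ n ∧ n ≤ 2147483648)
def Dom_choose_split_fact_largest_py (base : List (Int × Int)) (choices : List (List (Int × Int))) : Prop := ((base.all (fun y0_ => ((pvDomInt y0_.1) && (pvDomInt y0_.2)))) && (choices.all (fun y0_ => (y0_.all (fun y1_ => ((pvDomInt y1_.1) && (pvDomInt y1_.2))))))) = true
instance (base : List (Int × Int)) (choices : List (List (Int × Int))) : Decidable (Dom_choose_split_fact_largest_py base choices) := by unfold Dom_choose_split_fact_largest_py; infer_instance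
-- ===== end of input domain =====

-- ===== PORT A =====
-- B is a single pass keeping the running best (count, first new key); A builds all new-key lists, sorts by length and scans the reversal.
-- A's reversed-for loop: first set with positive length wins, return its element 0.
def pvPickRev : List (List Int) → Option Int
  | [] => none
  | s :: rest => if 0 < s.length then PySem.List.pyGet? s 0 else pvPickRev rest

def choose_split_fact_largest_py (base : List (Int × Int)) (choices : List (List (Int × Int))) : Option Int :=
  let baseD := PySem.Dict.ofList base
  let sets : List (List Int) := choices.foldl (fun sets a =>
    sets ++ [ (PySem.Dict.ofList a).items.foldl (fun s kv =>
        if !(baseD.contains kv.1) || (baseD.get? kv.1 == some (-1)) then s ++ [kv.1] else s) [] ]) []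
  let sorted := PySem.List.sorted sets (fun s => s.length) false
  pvPickRev sorted.reverse

-- ===== PORT B =====
def choose_split_fact_largest_py_alt (base : List (Int × Int)) (choices : List (List (Int × Int))) : Option Int :=
  let baseD := PySem.Dict.ofList base
  let st := choices.foldl (fun (st : Int × Option Int) a =>
      let cf := (PySem.Dict.ofList a).keys.foldl (fun (p : Int × Option Int) k =>
          if !(baseD.contains k) || (baseD.get? k == some (-1)) then
            (p.1 + 1, if p.2 = none then some k else p.2)
          else p) ((0 : Int), (none : Option Int))
      if cf.1 ≥ st.1 then cf else st) ((0 : Int), (none : Option Int))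
  if st.1 > 0 then st.2 else none

-- ===== PRECONDITION & SPEC =====
def Spec_choose_split_fact_largest_py (base : List (Int × Int)) (choices : List (List (Int × Int))) (out : Option Int) : Prop := out = choose_split_fact_largest_py_alt base choices
instance (base : List (Int × Int)) (choices : List (List (Int × Int))) (out : Option Int) : Decidable (Spec_choose_split_fact_largest_py base choices out) := by unfold Spec_choose_split_fact_largest_py; infer_instance

-- ===== CLAIM (what is proved, stated in full; the proofs are below) =====
def Claim_equal_choose_split_fact_largest_py : Prop := ∀ (base : List (Int × Int)) (choices : List (List (Int × Int))), Dom_choose_split_fact_largest_py base choices → Spec_choose_split_fact_largest_py base choices (choose_split_fact_largest_py base choices)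

-- ===== LEMMAS AND PROOFS =====

-- B's outer step, expressed on the new-key list of a choice.
def pvBest (st : Int × Option Int) (s : List Int) : Int × Option Int :=
  if (s.length : Int) ≥ st.1 then ((s.length : Int), s.head?) else st

-- B's inner loop computes (length, first element) of the filtered key list.
theorem pvInner_eq (q : Int → Bool) (ks : List Int) (c : Int) (f : Option Int) :
    ks.foldl (fun (p : Int × Option Int) k =>
        if q k then (p.1 + 1, if p.2 = none then some k else p.2) else p) (c, f)
      = (c + ((ks.filter q).length : Int), if f = none then (ks.filter q).head? else f) := by
  induction ks generalizing c f with
  | nil => simp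
  | cons k ks ih =>
    by_cases hq : q k
    · simp [hq, ih]
      cases f <;> simp <;> ring
    · simp [hq, ih]

-- pick after appending one set at the end.
theorem pvPickRev_append (l : List (List Int)) (x : List Int) :
    pvPickRev (l ++ [x]).reverse = if 0 < x.length then PySem.List.pyGet? x 0 else pvPickRev l.reverse := by
  simp [pvPickRev]

-- inserting below the last element keeps the tail segment.
theorem pvInsertBy_append_last (before : List Int → List Int → Bool) (s z : List Int)
    (l : List (List Int)) (h : before s z = true) :
    PySem.List.insertBy before s (l ++ [z]) = PySem.List.insertBy before s l ++ [z] := by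
  induction l with
  | nil => simp [PySem.List.insertBy, h]
  | cons y l ih =>
    by_cases hy : before s y
    · simp [PySem.List.insertBy, hy]
    · simp [PySem.List.insertBy, hy, ih]

-- Main invariant: A's sort-and-scan equals B's running-best fold, processing choices left to right.
theorem pvMain (ss : List (List Int)) :
    (0 ≤ (ss.foldl pvBest ((0 : Int), (none : Option Int))).1) ∧
    (∀ s ∈ ss, (s.length : Int) ≤ (ss.foldl pvBest ((0 : Int), (none : Option Int))).1) ∧
    ((ss.foldl pvBest ((0 : Int), (none : Option Int))).1 > 0 →
      ∃ l z, PySem.List.sorted ss (fun s => s.length) false = l ++ [z] ∧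
        (z.length : Int) = (ss.foldl pvBest ((0 : Int), (none : Option Int))).1) ∧
    pvPickRev (PySem.List.sorted ss (fun s => s.length) false).reverse
      = (if (ss.foldl pvBest ((0 : Int), (none : Option Int))).1 > 0
          then (ss.foldl pvBest ((0 : Int), (none : Option Int))).2 else none) := by
  induction ss using List.reverseRecOn with
  | nil =>
    refine ⟨le_refl 0, by simp, by simp, ?_⟩
    simp [PySem.List.sorted, pvPickRev]
  | append_singleton l s ih =>
    obtain ⟨h0, hub, hex, hpick⟩ := ih
    have hfold : ∀ (r : List (List Int)), (r ++ [s]).foldl pvBest ((0 : Int), (none : Option Int))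
        = pvBest (r.foldl pvBest ((0 : Int), (none : Option Int))) s := by
      intro r; rw [List.foldl_append]; rfl
    have hsorted : PySem.List.sorted (l ++ [s]) (fun t => t.length) false
        = PySem.List.insertBy (fun a b => decide (a.length < b.length)) s
            (PySem.List.sorted l (fun t => t.length) false) := by
      rw [PySem.List.sorted_eq_foldl_insertBy, List.foldl_append,
        ← PySem.List.sorted_eq_foldl_insertBy]
      rfl
    rw [hfold]
    set st := l.foldl pvBest ((0 : Int), (none : Option Int)) with hst
    by_cases hc : (s.length : Int) ≥ st.1
    · -- s becomes (ties included) the new best; insertBy appends it at the end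
      have hnb : ∀ y ∈ PySem.List.sorted l (fun t => t.length) false,
          (fun a b => decide (a.length < b.length)) s y = false := by
        intro y hy
        have hyl : y ∈ l := (PySem.List.mem_sorted l _ false y).mp hy
        have := hub y hyl
        simp only [decide_eq_false_iff_not, not_lt]
        exact_mod_cast le_trans this hc
      have happ : PySem.List.sorted (l ++ [s]) (fun t => t.length) false
          = PySem.List.sorted l (fun t => t.length) false ++ [s] := by
        rw [hsorted, PySem.List.insertBy_of_forall_not_before _ _ _ hnb]
      have hbest : pvBest st s = ((s.length : Int), s.head?) := by
        simp [pvBest, hc]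
      refine ⟨by simp [hbest], ?_, ?_, ?_⟩
      · intro t ht
        rcases List.mem_append.mp ht with h | h
        · exact hbest ▸ le_trans (hub t h) hc
        · simp at h; simp [h, hbest]
      · intro _
        exact ⟨_, s, happ, by simp [hbest]⟩
      · rw [happ, pvPickRev_append, hbest]
        by_cases hs : 0 < s.length
        · have : (0:Int) < (s.length : Int) := by exact_mod_cast hs
          rw [if_pos hs, if_pos this]
          cases s with
          | nil => simp at hs
          | cons a t => simp [PySem.List.pyGet?, PySem.List.pyIdx?]
        · have hz : s.length = 0 := by omega
          have hst0 : st.1 = 0 := by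
            have : (s.length : Int) = 0 := by exact_mod_cast hz
            omega
          rw [if_neg hs, hpick, hst0]
          simp [hz]
    · -- the best stays; s is inserted strictly below the last (maximal) set
      simp only [ge_iff_le, not_le] at hc
      have hbest : pvBest st s = st := by
        simp only [pvBest, ge_iff_le]
        rw [if_neg (by omega)]
      have hpos : st.1 > 0 := by
        have : (0:Int) ≤ (s.length : Int) := by positivity
        omega
      obtain ⟨l', z, hacc, hzlen⟩ := hex hpos
      have hzb : (fun a b => decide (a.length < b.length)) s z = true := by
        simp only [decide_eq_true_eq]
        have : (s.length : Int) < (z.length : Int) := by omega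
        exact_mod_cast this
      have happ : PySem.List.sorted (l ++ [s]) (fun t => t.length) false
          = PySem.List.insertBy (fun a b => decide (a.length < b.length)) s l' ++ [z] := by
        rw [hsorted, hacc, pvInsertBy_append_last _ _ _ _ hzb]
      have hzpos : 0 < z.length := by
        by_contra h
        have : z.length = 0 := by omega
        rw [this] at hzlen; simp at hzlen; omega
      refine ⟨by rw [hbest]; exact h0, ?_, ?_, ?_⟩
      · intro t ht
        rcases List.mem_append.mp ht with h | h
        · rw [hbest]; exact hub t h
        · simp at h; rw [hbest, h]; omega
      · intro _
        exact ⟨_, z, happ, by rw [hbest]; exact hzlen⟩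
      · rw [happ, pvPickRev_append, if_pos hzpos, hbest, if_pos hpos]
        rw [hacc, pvPickRev_append, if_pos hzpos, if_pos hpos] at hpick
        exact hpick

-- the new-key list of one choice, as a filter-map
def pvNewKeys (baseD : PySem.Dict Int Int) (a : List (Int × Int)) : List Int :=
  ((PySem.Dict.ofList a).items.filter
      (fun kv => !(baseD.contains kv.1) || (baseD.get? kv.1 == some (-1)))).map (·.1)

theorem pvA_inner (baseD : PySem.Dict Int Int) (a : List (Int × Int)) :
    (PySem.Dict.ofList a).items.foldl (fun s kv =>
        if !(baseD.contains kv.1) || (baseD.get? kv.1 == some (-1)) then s ++ [kv.1] else s) []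
      = pvNewKeys baseD a := by
  simpa [pvNewKeys] using PySem.List.foldl_append_if
    (fun kv : Int × Int => !(baseD.contains kv.1) || (baseD.get? kv.1 == some (-1)))
    (fun kv => kv.1) (PySem.Dict.ofList a).items []

theorem pvB_inner (baseD : PySem.Dict Int Int) (a : List (Int × Int)) :
    (PySem.Dict.ofList a).keys.foldl (fun (p : Int × Option Int) k =>
        if !(baseD.contains k) || (baseD.get? k == some (-1)) then
          (p.1 + 1, if p.2 = none then some k else p.2)
        else p) ((0 : Int), (none : Option Int))
      = (((pvNewKeys baseD a).length : Int), (pvNewKeys baseD a).head?) := by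
  rw [pvInner_eq]
  have hk : (PySem.Dict.ofList a).keys = (PySem.Dict.ofList a).items.map (·.1) := by
    simp [PySem.Dict.keys]
  rw [hk, List.filter_map]
  simp [pvNewKeys, Function.comp_def]

-- ===== VERDICT (by name: the statement is the Claim_ definition above) =====
theorem choose_split_fact_largest_py_spec : Claim_equal_choose_split_fact_largest_py := by
  intro base choices _
  unfold Spec_choose_split_fact_largest_py choose_split_fact_largest_py
    choose_split_fact_largest_py_alt
  simp only [pvA_inner, pvB_inner]
  rw [PySem.List.foldl_append_singleton_eq_map]
  have hBfold : choices.foldl (fun (st : Int × Option Int) a =>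
        if (((pvNewKeys (PySem.Dict.ofList base) a).length : Int),
            (pvNewKeys (PySem.Dict.ofList base) a).head?).1 ≥ st.1 then
          ((((pvNewKeys (PySem.Dict.ofList base) a)).length : Int),
            (pvNewKeys (PySem.Dict.ofList base) a).head?)
        else st) ((0 : Int), (none : Option Int))
      = (choices.map (pvNewKeys (PySem.Dict.ofList base))).foldl pvBest
          ((0 : Int), (none : Option Int)) := by
    rw [List.foldl_map]
    congr 1
  rw [hBfold]
  simpa using (pvMain (choices.map (pvNewKeys (PySem.Dict.ofList base)))).2.2.2
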